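-- pv_equiv track=rewrite | github.com/KeivanJamali/Pure-Python | P0/10-TA_Course_Teaching/03-a.py | give_number
-- ===== SOURCE A (Python) =====
-- def traspose(matrix: list) -> list:
--     length = len(matrix)
--     result = []
--     for i in range(length):
--         result.append([])
--     for i in range(length):
--         for j in range(length):
--             result[j].append(matrix[i][j])
--     return result
--
-- def give_number(matrix: list) -> list:
--     result = []
--     for i in matrix:
--         result.append(sum(i))
--     t_matrix = traspose(matrix)
--     for i in t_matrix:
--         result.append(sum(i))
--     return result
-- ===== SOURCE B (Python) =====
-- def give_number(matrix: list) -> list: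
--     n = len(matrix)
--     col = [0] * n
--     out = []
--     for row in matrix:
--         out.append(sum(row))
--         col = [col[j] + row[j] for j in range(n)]
--     return out + col
-- ===== Notes on version B (the rewrite author's own statement) =====
-- stated objective: alternative
-- what changed: Single accumulating pass over the rows that maintains a running column-sum vector, instead of building n empty lists, materialising the full transpose with nested index loops, and summing its rows afterwards.
import Mathlib
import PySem

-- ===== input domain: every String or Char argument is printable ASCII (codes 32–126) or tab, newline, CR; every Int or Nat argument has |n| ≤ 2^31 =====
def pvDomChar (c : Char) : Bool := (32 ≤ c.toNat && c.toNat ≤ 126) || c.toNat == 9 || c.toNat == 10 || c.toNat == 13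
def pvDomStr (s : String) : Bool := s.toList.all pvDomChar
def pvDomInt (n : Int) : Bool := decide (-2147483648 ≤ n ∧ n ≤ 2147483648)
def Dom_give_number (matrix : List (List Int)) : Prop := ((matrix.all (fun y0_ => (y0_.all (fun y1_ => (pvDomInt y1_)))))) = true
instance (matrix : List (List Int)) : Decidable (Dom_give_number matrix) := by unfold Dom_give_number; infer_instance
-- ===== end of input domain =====

-- B replaces A's build-the-transpose-then-sum-its-rows structure with a single pass
-- keeping a running column-sum vector (objective: alternative decomposition).

-- ===== PORT A =====
-- 'traspose': n empty lists, then result[j].append(matrix[i][j]) for i, j in range(n).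
-- Indices i, j come from range(n) so are nonnegative; 'matrix[i]' is exact via getD
-- (i < n always); 'matrix[i][j]' uses getD 0 — exact wherever Python does not raise
-- (the raising inputs are excluded by Pre_give_number).
def traspose (matrix : List (List Int)) : List (List Int) :=
  let length := matrix.length
  let result := (List.range length).foldl (fun r _ => r ++ [([] : List Int)]) []
  (List.range length).foldl (fun r i =>
    (List.range length).foldl (fun r j =>
      r.set j ((r.getD j []) ++ [((matrix.getD i []).getD j 0)])) r) result

def give_number (matrix : List (List Int)) : List Int :=
  let result := matrix.foldl (fun acc i => acc ++ [i.foldl (· + ·) 0]) []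
  let t_matrix := traspose matrix
  t_matrix.foldl (fun acc i => acc ++ [i.foldl (· + ·) 0]) result

-- ===== PORT B =====
-- 'row[j]' for j in range(n): j nonnegative, ported as getD 0 — exact wherever
-- Python does not raise (raising inputs excluded by Pre_give_number).
def give_number_alt (matrix : List (List Int)) : List Int :=
  let n := matrix.length
  let s := matrix.foldl (fun (s : List Int × List Int) row =>
      (s.1 ++ [row.foldl (· + ·) 0],
       (List.range n).map (fun j => s.2.getD j 0 + row.getD j 0)))
    (([] : List Int), List.replicate n (0 : Int))
  s.1 ++ s.2

-- ===== PRECONDITION & SPEC =====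
-- Pre_: exactly the inputs where Python A returns — every row must have at least
-- len(matrix) entries, else matrix[i][j] in the transpose raises IndexError
-- (B's row[j] raises there too).
def Pre_give_number (matrix : List (List Int)) : Prop :=
  ∀ row ∈ matrix, matrix.length ≤ row.length
instance (matrix : List (List Int)) : Decidable (Pre_give_number matrix) := by
  unfold Pre_give_number; infer_instance
def pvWitness_give_number : List (List Int) := [[1, 2], [3, 4]]

def Spec_give_number (matrix : List (List Int)) (out : List Int) : Prop := out = give_number_alt matrix
instance (matrix : List (List Int)) (out : List Int) : Decidable (Spec_give_number matrix out) := by unfold Spec_give_number; infer_instance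

-- ===== CLAIM (what is proved, stated in full; the proofs are below) =====
def Claim_equal_give_number : Prop := ∀ (matrix : List (List Int)), Dom_give_number matrix → Pre_give_number matrix → Spec_give_number matrix (give_number matrix)

-- ===== LEMMAS AND PROOFS =====

-- building n empty lists
lemma foldl_append_nil (n : Nat) (s : List (List Int)) :
    (List.range n).foldl (fun r _ => r ++ [([] : List Int)]) s
      = s ++ List.replicate n [] := by
  induction n generalizing s with
  | zero => simp
  | succ k ih => simp [List.range_succ, ih, List.replicate_succ']

-- one inner loop of traspose on a vector presented as a map over range
lemma inner_loop (row : List Int) (n m : Nat) (hnm : n ≤ m) (g : Nat → List Int) :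
    (List.range n).foldl (fun r j => r.set j ((r.getD j []) ++ [row.getD j 0]))
        ((List.range m).map g)
      = (List.range m).map (fun j => if j < n then g j ++ [row.getD j 0] else g j) := by
  induction n generalizing g with
  | zero => simp
  | succ k ih =>
    rw [List.range_succ, List.foldl_append, ih (Nat.le_of_succ_le hnm)]
    simp only [List.foldl_cons, List.foldl_nil]
    apply List.ext_getElem
    · simp
    · intro i h1 h2
      simp only [List.length_set, List.length_map, List.length_range] at h1
      have hk : k < m := hnm
      rw [List.getElem_set]
      simp only [List.getElem_map, List.getElem_range]
      by_cases hik : k = i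
      · subst hik
        simp [List.getD_eq_getElem?_getD, h1]
      · simp only [if_neg hik]
        have : i < k ∨ ¬ i < k := by omega
        rcases this with h | h
        · simp [h, Nat.lt_succ_of_lt h]
        · have h' : ¬ i < k + 1 := by omega
          simp [h, h']

-- the outer loop of traspose, as a fold over the rows themselves
lemma outer_loop (rows : List (List Int)) (n : Nat) (g : Nat → List Int) :
    rows.foldl (fun r row =>
        (List.range n).foldl (fun r j => r.set j ((r.getD j []) ++ [row.getD j 0])) r)
        ((List.range n).map g)
      = (List.range n).map (fun j => g j ++ rows.map (fun row => row.getD j 0)) := by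
  induction rows generalizing g with
  | nil => simp
  | cons row rest ih =>
    simp only [List.foldl_cons]
    rw [inner_loop row n n (le_refl n) g, ih]
    apply List.map_congr_left
    intro j hj
    simp only [List.mem_range] at hj
    simp [hj]

-- a range-indexed fold over matrix entries equals a fold over the rows
lemma range_foldl_rows (rows : List (List Int)) (f : List (List Int) → List Int → List (List Int)) (r0 : List (List Int)) :
    (List.range rows.length).foldl (fun r i => f r (rows.getD i [])) r0
      = rows.foldl f r0 := by
  induction rows using List.reverseRecOn generalizing r0 with
  | nil => simp
  | append_singleton rest row ih =>
    simp only [List.length_append, List.length_singleton, List.range_succ,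
      List.foldl_append, List.foldl_cons, List.foldl_nil]
    rw [PySem.List.foldl_congr_mem (g := fun r i => f r (rest.getD i [])), ih]
    · congr 1
      rw [List.getD_eq_getElem?_getD, List.getElem?_append_right (by omega)]
      simp
    · intro r i hi
      simp only [List.mem_range] at hi
      rw [List.getD_eq_getElem?_getD, List.getD_eq_getElem?_getD,
        List.getElem?_append_left hi]

-- characterisation of traspose (over the whole domain; no precondition needed)
lemma traspose_eq (matrix : List (List Int)) :
    traspose matrix
      = (List.range matrix.length).map
          (fun j => matrix.map (fun row => row.getD j 0)) := by
  unfold traspose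
  simp only []
  rw [foldl_append_nil, List.nil_append]
  have hrep : (List.replicate matrix.length ([] : List Int))
      = (List.range matrix.length).map (fun _ => ([] : List Int)) := by
    simp [List.map_const']
  rw [hrep, range_foldl_rows matrix
    (fun r row => (List.range matrix.length).foldl
      (fun r j => r.set j ((r.getD j []) ++ [row.getD j 0])) r),
    outer_loop matrix matrix.length (fun _ => [])]
  simp

-- the pair-state fold of B splits into two independent folds
lemma pair_foldl (rows : List (List Int)) (n : Nat) (a : List Int) (b : List Int) :
    rows.foldl (fun (s : List Int × List Int) row =>
        (s.1 ++ [row.foldl (· + ·) 0],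
         (List.range n).map (fun j => s.2.getD j 0 + row.getD j 0))) (a, b)
      = (rows.foldl (fun acc row => acc ++ [row.foldl (· + ·) 0]) a,
         rows.foldl (fun c row => (List.range n).map (fun j => c.getD j 0 + row.getD j 0)) b) := by
  induction rows generalizing a b with
  | nil => simp
  | cons row rest ih =>
    simp only [List.foldl_cons]
    exact ih _ _

-- B's running column vector, characterised
lemma col_foldl (rows : List (List Int)) (n : Nat) (g : Nat → Int) :
    rows.foldl (fun c row => (List.range n).map (fun j => c.getD j 0 + row.getD j 0))
        ((List.range n).map g)
      = (List.range n).map (fun j => rows.foldl (fun a row => a + row.getD j 0) (g j)) := by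
  induction rows generalizing g with
  | nil => simp
  | cons row rest ih =>
    simp only [List.foldl_cons]
    have hstep : (List.range n).map
        (fun j => ((List.range n).map g).getD j 0 + row.getD j 0)
        = (List.range n).map (fun j => g j + row.getD j 0) := by
      apply List.map_congr_left
      intro j hj
      simp only [List.mem_range] at hj
      simp [List.getD_eq_getElem?_getD, hj]
    rw [hstep, ih]

lemma flatten_map_singleton {α β : Type} (l : List α) (f : α → β) :
    (l.map (fun x => [f x])).flatten = l.map f := by
  induction l with
  | nil => rfl
  | cons x xs ih => simp [ih]

-- ===== VERDICT (by name: the statement is the Claim_ definition above) =====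
theorem give_number_spec : Claim_equal_give_number := by
  intro matrix _ _
  show give_number matrix = give_number_alt matrix
  unfold give_number give_number_alt
  simp only []
  rw [traspose_eq]
  have hrep : (List.replicate matrix.length (0 : Int))
      = (List.range matrix.length).map (fun _ => (0 : Int)) := by
    simp [List.map_const']
  rw [hrep, pair_foldl, col_foldl]
  simp [PySem.List.foldl_append_singleton_eq_map, List.foldl_map]
  rw [flatten_map_singleton]
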